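-- pv_equiv track=rewrite | github.com/nguyenhongson1902/algorithmic-toolbox-solutions | week6_dynamic_programming2/2_partitioning_souvenirs/partition3.py | subset_sums
-- ===== SOURCE A (Python) =====
-- def subset_sums(S, n, sum_S1, sum_S2, sum_S3):
--     if sum_S1 == 0 and sum_S2 == 0 and sum_S3 == 0:
--         return 1
--
--     if n < 0:
--         return 0
--
--     A = 0
--     if sum_S1 >= S[n]:
--         A = subset_sums(S, n-1, sum_S1 - S[n], sum_S2, sum_S3)
--
--     B = 0
--     if A != 1 and sum_S2 >= S[n]:
--         B = subset_sums(S, n-1, sum_S1, sum_S2 - S[n], sum_S3)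
--
--     C = 0
--     if A != 1 and B != 1 and sum_S3 >= S[n]:
--         C = subset_sums(S, n-1, sum_S1, sum_S2, sum_S3 - S[n])
--
--     return A or B or C
-- ===== SOURCE B (Python) =====
-- def subset_sums(S, n, sum_S1, sum_S2, sum_S3):
--     # Breadth-first pass over items n..0, keeping the SET of reachable
--     # remaining-sum triples instead of backtracking recursion.
--     states = {(sum_S1, sum_S2, sum_S3)}
--     i = n
--     while True:
--         if (0, 0, 0) in states:
--             return 1
--         if i < 0:
--             return 0
--         x = S[i]
--         nxt = set()
--         for (a, b, c) in states:
--             if a >= x: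
--                 nxt.add((a - x, b, c))
--             if b >= x:
--                 nxt.add((a, b - x, c))
--             if c >= x:
--                 nxt.add((a, b, c - x))
--         states = nxt
--         i -= 1
-- ===== Notes on version B (the rewrite author's own statement) =====
-- stated objective: alternative
-- what changed: Replaces the pruned exponential backtracking recursion by an iterative breadth-first sweep over items n..0 that maintains the deduplicated SET of reachable remaining-sum triples, so each distinct (s1,s2,s3) state is expanded once per level instead of once per search path.
import Mathlib
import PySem

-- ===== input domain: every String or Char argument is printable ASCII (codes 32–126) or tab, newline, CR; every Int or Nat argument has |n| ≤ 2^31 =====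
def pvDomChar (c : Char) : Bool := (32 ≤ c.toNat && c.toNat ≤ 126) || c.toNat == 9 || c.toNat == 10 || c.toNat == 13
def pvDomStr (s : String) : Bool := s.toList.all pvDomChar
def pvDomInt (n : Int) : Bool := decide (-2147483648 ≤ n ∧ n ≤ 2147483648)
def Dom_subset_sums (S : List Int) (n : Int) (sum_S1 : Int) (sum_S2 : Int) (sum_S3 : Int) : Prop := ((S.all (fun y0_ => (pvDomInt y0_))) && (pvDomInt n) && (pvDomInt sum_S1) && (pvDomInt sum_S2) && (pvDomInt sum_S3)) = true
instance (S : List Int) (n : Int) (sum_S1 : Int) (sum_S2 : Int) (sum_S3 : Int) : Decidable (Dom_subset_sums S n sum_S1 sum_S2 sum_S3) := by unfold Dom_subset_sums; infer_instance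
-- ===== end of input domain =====

-- B replaces A's pruned backtracking recursion by an iterative per-item sweep over the set of
-- reachable remaining-sum triples (alternative algorithm; return values proved equal on Pre_).

-- ===== PORT A =====
def subset_sums (S : List Int) (n : Int) (sum_S1 : Int) (sum_S2 : Int) (sum_S3 : Int) : Int :=
  if sum_S1 = 0 ∧ sum_S2 = 0 ∧ sum_S3 = 0 then 1
  else if n < 0 then 0
  else
    match PySem.List.pyGet? S n with
    | none => 0  -- IndexError in Python; excluded by Pre_
    | some x =>
      let A := if sum_S1 ≥ x then subset_sums S (n-1) (sum_S1 - x) sum_S2 sum_S3 else 0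
      let B := if A ≠ 1 ∧ sum_S2 ≥ x then subset_sums S (n-1) sum_S1 (sum_S2 - x) sum_S3 else 0
      let C := if A ≠ 1 ∧ B ≠ 1 ∧ sum_S3 ≥ x then subset_sums S (n-1) sum_S1 sum_S2 (sum_S3 - x) else 0
      if A ≠ 0 then A else if B ≠ 0 then B else C
termination_by (n+1).toNat
decreasing_by all_goals omega

-- ===== PORT B =====
-- body of B's inner 'for' loop: the three conditional set-inserts for one state s
def pvAddMoves (x : Int) (nxt : PySem.Set (Int × Int × Int)) (s : Int × Int × Int) : PySem.Set (Int × Int × Int) :=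
  let nxt := if s.1 ≥ x then PySem.Set.add nxt (s.1 - x, s.2.1, s.2.2) else nxt
  let nxt := if s.2.1 ≥ x then PySem.Set.add nxt (s.1, s.2.1 - x, s.2.2) else nxt
  if s.2.2 ≥ x then PySem.Set.add nxt (s.1, s.2.1, s.2.2 - x) else nxt

-- B's 'while True' loop (i counts down from n)
def pvAltLoop (S : List Int) (i : Int) (states : PySem.Set (Int × Int × Int)) : Int :=
  if ((0 : Int), (0 : Int), (0 : Int)) ∈ states then 1
  else if i < 0 then 0
  else
    match PySem.List.pyGet? S i with
    | none => 0  -- IndexError in Python; excluded by Pre_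
    | some x => pvAltLoop S (i-1) (states.foldl (pvAddMoves x) PySem.Set.empty)
termination_by (i+1).toNat
decreasing_by all_goals omega

def subset_sums_alt (S : List Int) (n : Int) (sum_S1 : Int) (sum_S2 : Int) (sum_S3 : Int) : Int :=
  pvAltLoop S n (PySem.Set.ofList [(sum_S1, sum_S2, sum_S3)])

-- ===== PRECONDITION & SPEC =====
-- Pre_ excludes exactly the inputs where Python A raises IndexError (n ≥ len(S) reached with a
-- nonzero target triple); A returns normally everywhere else, nothing returning is excluded.
def Pre_subset_sums (S : List Int) (n : Int) (sum_S1 : Int) (sum_S2 : Int) (sum_S3 : Int) : Prop :=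
  n < (S.length : Int) ∨ (sum_S1 = 0 ∧ sum_S2 = 0 ∧ sum_S3 = 0)
instance (S : List Int) (n : Int) (sum_S1 : Int) (sum_S2 : Int) (sum_S3 : Int) : Decidable (Pre_subset_sums S n sum_S1 sum_S2 sum_S3) := by unfold Pre_subset_sums; infer_instance

def pvWitness_subset_sums : List Int × Int × Int × Int × Int := ([1, 2, 3], 2, 3, 2, 1)

def Spec_subset_sums (S : List Int) (n : Int) (sum_S1 : Int) (sum_S2 : Int) (sum_S3 : Int) (out : Int) : Prop := out = subset_sums_alt S n sum_S1 sum_S2 sum_S3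
instance (S : List Int) (n : Int) (sum_S1 : Int) (sum_S2 : Int) (sum_S3 : Int) (out : Int) : Decidable (Spec_subset_sums S n sum_S1 sum_S2 sum_S3 out) := by unfold Spec_subset_sums; infer_instance

-- ===== CLAIM (what is proved, stated in full; the proofs are below) =====
def Claim_equal_subset_sums : Prop := ∀ (S : List Int) (n : Int) (sum_S1 : Int) (sum_S2 : Int) (sum_S3 : Int), Dom_subset_sums S n sum_S1 sum_S2 sum_S3 → Pre_subset_sums S n sum_S1 sum_S2 sum_S3 → Spec_subset_sums S n sum_S1 sum_S2 sum_S3 (subset_sums S n sum_S1 sum_S2 sum_S3)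

-- ===== LEMMAS AND PROOFS =====

-- one step of B's relation: t is obtained from s by placing item x into one fitting part
def pvRel (x : Int) (s t : Int × Int × Int) : Prop :=
  (s.1 ≥ x ∧ t = (s.1 - x, s.2.1, s.2.2)) ∨
  (s.2.1 ≥ x ∧ t = (s.1, s.2.1 - x, s.2.2)) ∨
  (s.2.2 ≥ x ∧ t = (s.1, s.2.1, s.2.2 - x))

theorem pv_mem_addMoves (x : Int) (nxt : PySem.Set (Int × Int × Int)) (s t : Int × Int × Int) :
    t ∈ pvAddMoves x nxt s ↔ t ∈ nxt ∨ pvRel x s t := by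
  unfold pvAddMoves pvRel
  by_cases g1 : s.1 ≥ x <;> by_cases g2 : s.2.1 ≥ x <;> by_cases g3 : s.2.2 ≥ x <;>
    simp [g1, g2, g3, PySem.Set.mem_add] <;> tauto

theorem pv_mem_foldl (x : Int) (l : List (Int × Int × Int)) (acc : PySem.Set (Int × Int × Int))
    (t : Int × Int × Int) :
    t ∈ l.foldl (pvAddMoves x) acc ↔ t ∈ acc ∨ ∃ s ∈ l, pvRel x s t := by
  induction l generalizing acc with
  | nil => simp
  | cons s l ih =>
    simp only [List.foldl_cons, ih, pv_mem_addMoves, List.mem_cons]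
    constructor
    · rintro ((h | h) | ⟨u, hu, hr⟩)
      · exact Or.inl h
      · exact Or.inr ⟨s, Or.inl rfl, h⟩
      · exact Or.inr ⟨u, Or.inr hu, hr⟩
    · rintro (h | ⟨u, (rfl | hu), hr⟩)
      · exact Or.inl (Or.inl h)
      · exact Or.inl (Or.inr hr)
      · exact Or.inr ⟨u, hu, hr⟩

theorem subset_sums_01_aux (k : Nat) : ∀ (S : List Int) (n a b c : Int), (n+1).toNat ≤ k →
    subset_sums S n a b c = 0 ∨ subset_sums S n a b c = 1 := by
  induction k with
  | zero =>
    intro S n a b c hk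
    have hn : n < 0 := by omega
    rw [subset_sums]
    by_cases hbase : a = 0 ∧ b = 0 ∧ c = 0 <;> simp [hbase, hn]
  | succ k ih =>
    intro S n a b c hk
    rw [subset_sums]
    by_cases hbase : a = 0 ∧ b = 0 ∧ c = 0
    · simp [hbase]
    by_cases hn : n < 0
    · simp [hbase, hn]
    cases hget : PySem.List.pyGet? S n with
    | none => simp [hbase, hn]
    | some x =>
      simp only [hbase, hn, if_false]
      have h1 := ih S (n-1) (a-x) b c (by omega)
      have h2 := ih S (n-1) a (b-x) c (by omega)
      have h3 := ih S (n-1) a b (c-x) (by omega)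
      split_ifs <;> tauto

theorem subset_sums_01 (S : List Int) (n a b c : Int) :
    subset_sums S n a b c = 0 ∨ subset_sums S n a b c = 1 :=
  subset_sums_01_aux ((n+1).toNat) S n a b c le_rfl

-- unfolding of A at a non-base, in-range step: success iff some placement succeeds
theorem subset_sums_step (S : List Int) (n a b c x : Int)
    (hbase : ¬ (a = 0 ∧ b = 0 ∧ c = 0)) (hn : ¬ n < 0)
    (hget : PySem.List.pyGet? S n = some x) :
    (subset_sums S n a b c = 1 ↔
      ∃ t, pvRel x (a, b, c) t ∧ subset_sums S (n-1) t.1 t.2.1 t.2.2 = 1) := by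
  rw [subset_sums]
  simp only [hbase, hn, hget, if_false]
  constructor
  · intro h
    by_cases g1 : a ≥ x
    · rcases subset_sums_01 S (n-1) (a-x) b c with hA | hA
      · by_cases g2 : b ≥ x
        · rcases subset_sums_01 S (n-1) a (b-x) c with hB | hB
          · by_cases g3 : c ≥ x
            · refine ⟨(a, b, c - x), Or.inr (Or.inr ⟨g3, rfl⟩), ?_⟩
              simp only [g1, g2, g3, hA, hB, if_pos, and_true] at h
              simp_all
            · simp [g1, g2, g3, hA, hB] at h
          · exact ⟨(a, b - x, c), Or.inr (Or.inl ⟨g2, rfl⟩), hB⟩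
        · by_cases g3 : c ≥ x
          · refine ⟨(a, b, c - x), Or.inr (Or.inr ⟨g3, rfl⟩), ?_⟩
            simp only [g1, g2, g3, hA] at h
            simp_all
          · simp [g1, g2, g3, hA] at h
      · exact ⟨(a - x, b, c), Or.inl ⟨g1, rfl⟩, hA⟩
    · by_cases g2 : b ≥ x
      · rcases subset_sums_01 S (n-1) a (b-x) c with hB | hB
        · by_cases g3 : c ≥ x
          · refine ⟨(a, b, c - x), Or.inr (Or.inr ⟨g3, rfl⟩), ?_⟩
            simp only [g1, g2, g3, hB] at h
            simp_all
          · simp [g1, g2, g3, hB] at h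
        · exact ⟨(a, b - x, c), Or.inr (Or.inl ⟨g2, rfl⟩), hB⟩
      · by_cases g3 : c ≥ x
        · refine ⟨(a, b, c - x), Or.inr (Or.inr ⟨g3, rfl⟩), ?_⟩
          simp only [g1, g2, g3] at h
          simp_all
        · simp [g1, g2, g3] at h
  · rintro ⟨t, hr, ht⟩
    rcases hr with ⟨g, rfl⟩ | ⟨g, rfl⟩ | ⟨g, rfl⟩ <;> simp only at ht g <;>
    rcases subset_sums_01 S (n-1) (a-x) b c with hA | hA <;>
    rcases subset_sums_01 S (n-1) a (b-x) c with hB | hB <;>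
    by_cases g1 : a ≥ x <;> by_cases g2 : b ≥ x <;> by_cases g3 : c ≥ x <;>
      simp_all

theorem pvAltLoop_eq_aux (k : Nat) : ∀ (S : List Int) (i : Int) (states : PySem.Set (Int × Int × Int)),
    (i+1).toNat ≤ k →
    pvAltLoop S i states =
      if ∃ s ∈ states, subset_sums S i s.1 s.2.1 s.2.2 = 1 then 1 else 0 := by
  induction k with
  | zero =>
    intro S i states hk
    have hi : i < 0 := by omega
    rw [pvAltLoop]
    by_cases hmem : ((0 : Int), (0 : Int), (0 : Int)) ∈ states
    · rw [if_pos hmem, if_pos ⟨((0:Int),(0:Int),(0:Int)), hmem, by rw [subset_sums]; simp⟩]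
    · rw [if_neg hmem, if_pos hi, if_neg]
      rintro ⟨⟨a, b, c⟩, hs, hf⟩
      rw [subset_sums] at hf
      have hne : ¬ (a = 0 ∧ b = 0 ∧ c = 0) := by
        rintro ⟨rfl, rfl, rfl⟩; exact hmem hs
      simp [hne, hi] at hf
  | succ k ih =>
    intro S i states hk
    rw [pvAltLoop]
    by_cases hmem : ((0 : Int), (0 : Int), (0 : Int)) ∈ states
    · rw [if_pos hmem, if_pos ⟨((0:Int),(0:Int),(0:Int)), hmem, by rw [subset_sums]; simp⟩]
    rw [if_neg hmem]
    have hne : ∀ a b c : Int, (a, b, c) ∈ states → ¬ (a = 0 ∧ b = 0 ∧ c = 0) := by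
      intro a b c hs
      rintro ⟨rfl, rfl, rfl⟩; exact hmem hs
    by_cases hi : i < 0
    · rw [if_pos hi, if_neg]
      rintro ⟨⟨a, b, c⟩, hs, hf⟩
      rw [subset_sums] at hf
      simp [hne a b c hs, hi] at hf
    rw [if_neg hi]
    cases hget : PySem.List.pyGet? S i with
    | none =>
      rw [if_neg]
      rintro ⟨⟨a, b, c⟩, hs, hf⟩
      rw [subset_sums] at hf
      simp [hne a b c hs, hi, hget] at hf
    | some x =>
      show pvAltLoop S (i-1) (List.foldl (pvAddMoves x) PySem.Set.empty states) = _
      rw [ih S (i-1) _ (by omega)]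
      congr 1
      simp only [eq_iff_iff]
      constructor
      · rintro ⟨t, ht, hf⟩
        rw [pv_mem_foldl] at ht
        rcases ht with h | ⟨⟨a, b, c⟩, hs, hr⟩
        · simp [PySem.Set.empty] at h
        · exact ⟨(a, b, c), hs, (subset_sums_step S i a b c x (hne a b c hs) hi hget).2 ⟨t, hr, hf⟩⟩
      · rintro ⟨⟨a, b, c⟩, hs, hf⟩
        obtain ⟨t, hr, hf'⟩ := (subset_sums_step S i a b c x (hne a b c hs) hi hget).1 hf
        exact ⟨t, (pv_mem_foldl x states PySem.Set.empty t).2 (Or.inr ⟨(a, b, c), hs, hr⟩), hf'⟩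

theorem pvAltLoop_eq (S : List Int) (i : Int) (states : PySem.Set (Int × Int × Int)) :
    pvAltLoop S i states =
      if ∃ s ∈ states, subset_sums S i s.1 s.2.1 s.2.2 = 1 then 1 else 0 :=
  pvAltLoop_eq_aux ((i+1).toNat) S i states le_rfl

-- ===== VERDICT (by name: the statement is the Claim_ definition above) =====
theorem subset_sums_spec : Claim_equal_subset_sums := by
  intro S n a b c _ _
  unfold Spec_subset_sums subset_sums_alt
  rw [pvAltLoop_eq]
  have hmem : ∀ t : Int × Int × Int, t ∈ PySem.Set.ofList [(a, b, c)] ↔ t = (a, b, c) := by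
    intro t; rw [PySem.Set.mem_ofList]; simp
  rcases subset_sums_01 S n a b c with h | h
  · rw [h, if_neg]
    rintro ⟨⟨a', b', c'⟩, hs, hf⟩
    rw [hmem] at hs
    cases hs
    simp_all
  · rw [h, if_pos ⟨(a, b, c), (hmem _).2 rfl, h⟩]
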